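-- pv_equiv track=rewrite | github.com/Sabayon/entropy | lib/entropy/spm/plugins/interfaces/portage_plugin/__init__.py | sort_update_files
-- ===== SOURCE A (Python) =====
-- def sort_update_files(update_list):
--     """
--     docstring_title
--
--     @param update_list:
--     @type update_list:
--     @return:
--     @rtype:
--     """
--     sort_dict = {}
--     # sort per year
--     for item in update_list:
--         # get year
--         year = item.split("-")[1]
--         if year in sort_dict:
--             sort_dict[year].append(item)
--         else:
--             sort_dict[year] = []
--             sort_dict[year].append(item)
--     new_list = []
--     keys = sorted(sort_dict.keys())
--     for key in keys:
--         sort_dict[key].sort()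
--         new_list += sort_dict[key]
--     del sort_dict
--     return new_list
-- ===== SOURCE B (Python) =====
-- def sort_update_files(update_list):
--     return sorted(update_list, key=lambda x: (x.split("-")[1], x))
-- ===== Notes on version B (the rewrite author's own statement) =====
-- stated objective: simpler
-- what changed: The year-keyed grouping dict, the sort over its keys and the per-bucket sorts are replaced by one composite-key sort on (year, item), returning in a single expression.
import Mathlib
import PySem

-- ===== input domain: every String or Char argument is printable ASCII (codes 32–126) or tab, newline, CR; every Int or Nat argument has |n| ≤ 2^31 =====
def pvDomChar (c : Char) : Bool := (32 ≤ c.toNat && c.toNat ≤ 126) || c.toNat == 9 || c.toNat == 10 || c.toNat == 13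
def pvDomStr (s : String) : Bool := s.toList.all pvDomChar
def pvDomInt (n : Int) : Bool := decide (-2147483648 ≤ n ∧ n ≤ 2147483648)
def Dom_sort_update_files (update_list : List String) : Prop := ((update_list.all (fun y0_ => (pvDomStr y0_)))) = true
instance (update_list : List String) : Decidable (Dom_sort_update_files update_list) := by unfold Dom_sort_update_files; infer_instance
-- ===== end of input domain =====

-- B replaces A's year-keyed grouping dict plus key-sorting plus per-bucket sorting by ONE
-- composite-key sort on (year, item); equal return values are proved on all inputs where
-- every item contains "-" (elsewhere the Python raises IndexError).

-- year of an item: item.split("-")[1]; total here (defaults to "" where Python raises;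
-- Pre_ excludes those inputs). Shared by both ports because both Pythons contain this expression.
def pvYearOf (s : String) : String :=
  (PySem.List.pyGet? ((PySem.Str.split? s "-").getD []) 1).getD ""

-- ===== PORT A =====
def sort_update_files (update_list : List String) : List String :=
  let sort_dict : PySem.Dict String (List String) :=
    update_list.foldl (fun d item =>
      let year := pvYearOf item
      if d.contains year then
        d.insert year (d.getD year [] ++ [item])
      else
        let d' := d.insert year []
        d'.insert year (d'.getD year [] ++ [item])) PySem.Dict.empty
  let keys := PySem.List.sorted sort_dict.keys (fun x => x) false
  keys.foldl (fun new_list key =>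
    new_list ++ PySem.List.sorted (sort_dict.getD key []) (fun x => x) false) []

-- ===== PORT B =====
def sort_update_files_alt (update_list : List String) : List String :=
  PySem.List.sorted2 update_list (fun x => pvYearOf x) (fun x => x) false

-- ===== PRECONDITION & SPEC =====
-- Pre_ excludes exactly the inputs where some item contains no "-": there item.split("-")[1]
-- raises IndexError in both Pythons.
def Pre_sort_update_files (update_list : List String) : Prop :=
  ∀ s ∈ update_list, 2 ≤ ((PySem.Str.split? s "-").getD []).length
instance (update_list : List String) : Decidable (Pre_sort_update_files update_list) := by unfold Pre_sort_update_files; infer_instance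
def pvWitness_sort_update_files : List String := ["foo-2011-x", "bar-2009", "baz-2011"]

def Spec_sort_update_files (update_list : List String) (out : List String) : Prop := out = sort_update_files_alt update_list
instance (update_list : List String) (out : List String) : Decidable (Spec_sort_update_files update_list out) := by unfold Spec_sort_update_files; infer_instance

-- ===== CLAIM (what is proved, stated in full; the proofs are below) =====
def Claim_equal_sort_update_files : Prop := ∀ (update_list : List String), Dom_sort_update_files update_list → Pre_sort_update_files update_list → Spec_sort_update_files update_list (sort_update_files update_list)

-- ===== LEMMAS AND PROOFS =====

-- the composite key, as a single lexicographically ordered value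
def pvKeyL (s : String) : Lex (String × String) := toLex (pvYearOf s, s)

theorem pvKeyL_injective : Function.Injective pvKeyL := by
  intro a b h
  exact congrArg (fun t => (ofLex t).2) h

-- B's port is the plain sort by pvKeyL
theorem alt_eq_sorted_keyL (l : List String) :
    sort_update_files_alt l = PySem.List.sorted l pvKeyL false := by
  have hbef : (fun a b : String =>
      (decide (pvYearOf a < pvYearOf b) || (!decide (pvYearOf b < pvYearOf a) && decide (a < b))))
      = fun a b : String => decide (pvKeyL a < pvKeyL b) := by
    funext a b
    have : (pvKeyL a < pvKeyL b) ↔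
        (pvYearOf a < pvYearOf b ∨ (pvYearOf a = pvYearOf b ∧ a < b)) := by
      simpa [pvKeyL] using (Prod.Lex.lt_iff (x := toLex (pvYearOf a, a)) (y := toLex (pvYearOf b, b)))
    rcases lt_trichotomy (pvYearOf a) (pvYearOf b) with h | h | h
    · simp [this, h]
    · simp [this, h]
    · simp [this, h, not_lt_of_gt h, h.ne']
  show List.foldl (fun acc x => PySem.List.insertBy (fun a b =>
      (decide (pvYearOf a < pvYearOf b) || (!decide (pvYearOf b < pvYearOf a) && decide (a < b)))) x acc) [] l
    = List.foldl (fun acc x => PySem.List.insertBy (fun a b => decide (pvKeyL a < pvKeyL b)) x acc) [] l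
  rw [hbef]

-- A's grouping loop step is a Dict.modify
theorem step_eq_modify :
    (fun (d : PySem.Dict String (List String)) (item : String) =>
      let year := pvYearOf item
      if d.contains year then
        d.insert year (d.getD year [] ++ [item])
      else
        let d' := d.insert year []
        d'.insert year (d'.getD year [] ++ [item]))
    = fun d item => d.modify (pvYearOf item) [] (· ++ [item]) := by
  funext d item
  by_cases h : d.contains (pvYearOf item)
  · simp [h, PySem.Dict.modify]
  · have h' : d.contains (pvYearOf item) = false := by simpa using h
    simp [h', PySem.Dict.modify, PySem.Dict.getD_insert_self,
      PySem.Dict.insert_insert_self, PySem.Dict.getD_of_not_contains]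

-- A's result, in closed form: groups of a sorted nodup year list, each group sorted
theorem a_char (l : List String) :
    sort_update_files l =
      (PySem.List.sorted (PySem.Set.ofList (l.map pvYearOf)) (fun x => x) false).flatMap
        (fun y => PySem.List.sorted (l.filter (fun s => pvYearOf s == y)) (fun x => x) false) := by
  simp only [sort_update_files]
  rw [step_eq_modify]
  have hfold : l.foldl (fun d item => d.modify (pvYearOf item) [] (· ++ [item])) PySem.Dict.empty
      = (l.map (fun x => (pvYearOf x, x))).foldl
          (fun d p => d.modify p.1 [] (· ++ [p.2])) PySem.Dict.empty := by
    rw [List.foldl_map]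
  rw [hfold]
  have hkeys : ((l.map (fun x => (pvYearOf x, x))).foldl
      (fun d p => d.modify p.1 [] (· ++ [p.2])) PySem.Dict.empty).keys
      = PySem.Set.ofList (l.map pvYearOf) := by
    have := PySem.Dict.keys_foldl_modify_key (l.map (fun x => (pvYearOf x, x)))
      (fun p => p.1) [] (fun d p v => v ++ [p.2]) PySem.Dict.empty
    simpa [PySem.Set.update, PySem.Set.ofList, List.map_map, Function.comp_def] using this
  have hgetD : ∀ y, ((l.map (fun x => (pvYearOf x, x))).foldl
      (fun d p => d.modify p.1 [] (· ++ [p.2])) PySem.Dict.empty).getD y []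
      = l.filter (fun s => pvYearOf s == y) := by
    intro y
    have := PySem.Dict.getD_foldl_modify_append (l.map (fun x => (pvYearOf x, x)))
      PySem.Dict.empty y
    simpa [List.filter_map, List.map_map, Function.comp_def, List.map_id'] using this
  rw [hkeys]
  simp only [hgetD]
  rw [PySem.List.foldl_append_eq_flatMap]
  simp

-- sum helpers for the counting argument
theorem sum_map_ite_mem {c : Nat} : ∀ (Y : List String) (y0 : String), Y.Nodup → y0 ∈ Y →
    (Y.map (fun y => if y0 = y then c else 0)).sum = c := by
  intro Y y0 hnd hmem
  induction Y with
  | nil => cases hmem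
  | cons h t ih =>
    rcases List.mem_cons.mp hmem with rfl | hmem'
    · have hnot : ∀ y ∈ t, ¬ (y0 = y) := by
        intro y hy hEq; exact (List.nodup_cons.mp hnd).1 (hEq ▸ hy)
      have hz : (t.map (fun y => if y0 = y then c else 0)).sum = 0 := by
        apply List.sum_eq_zero
        intro x hx
        rcases List.mem_map.mp hx with ⟨y, hy, rfl⟩
        simp [hnot y hy]
      simp [hz]
    · have hne : y0 ≠ h := by
        rintro rfl; exact (List.nodup_cons.mp hnd).1 hmem'
      simp only [List.map_cons, List.sum_cons, if_neg hne]
      simpa using ih (List.nodup_cons.mp hnd).2 hmem'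

-- A's closed form is a permutation of the input
theorem a_perm (l : List String) :
    ((PySem.List.sorted (PySem.Set.ofList (l.map pvYearOf)) (fun x => x) false).flatMap
        (fun y => PySem.List.sorted (l.filter (fun s => pvYearOf s == y)) (fun x => x) false)).Perm l := by
  set Y := PySem.List.sorted (PySem.Set.ofList (l.map pvYearOf)) (fun x => x) false with hY
  have hYperm : Y.Perm (PySem.Set.ofList (l.map pvYearOf)) :=
    PySem.List.sorted_perm _ _ _
  have hYnd : Y.Nodup := hYperm.nodup_iff.mpr (PySem.Set.nodup_ofList _)
  rw [List.perm_iff_count]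
  intro a
  rw [List.count_flatMap]
  have hterm : ∀ y, List.count a (PySem.List.sorted (l.filter (fun s => pvYearOf s == y)) (fun x => x) false)
      = if pvYearOf a = y then l.count a else 0 := by
    intro y
    have hc : List.count a (PySem.List.sorted (l.filter (fun s => pvYearOf s == y)) (fun x => x) false)
        = List.count a (l.filter (fun s => pvYearOf s == y)) :=
      (PySem.List.sorted_perm _ _ _).count_eq a
    by_cases h : pvYearOf a = y
    · rw [hc, List.count_filter (by simp [h])]
      simp [h]
    · rw [hc, if_neg h, List.count_eq_zero]
      intro hmem
      exact h (by simpa using (List.mem_filter.mp hmem).2)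
  simp only [Function.comp_def]
  rw [List.map_congr_left (fun y _ => hterm y)]
  by_cases hmem : a ∈ l
  · have hy0 : pvYearOf a ∈ Y := by
      rw [hYperm.mem_iff, PySem.Set.mem_ofList]
      exact List.mem_map_of_mem hmem
    exact sum_map_ite_mem Y (pvYearOf a) hYnd hy0
  · have h0 : l.count a = 0 := List.count_eq_zero.mpr hmem
    rw [h0]
    simp

-- A's closed form is pairwise nondecreasing in pvKeyL
theorem a_pairwise (l : List String) :
    List.Pairwise (fun a b => pvKeyL a ≤ pvKeyL b)
      ((PySem.List.sorted (PySem.Set.ofList (l.map pvYearOf)) (fun x => x) false).flatMap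
        (fun y => PySem.List.sorted (l.filter (fun s => pvYearOf s == y)) (fun x => x) false)) := by
  set Y := PySem.List.sorted (PySem.Set.ofList (l.map pvYearOf)) (fun x => x) false with hY
  set g := fun y => PySem.List.sorted (l.filter (fun s => pvYearOf s == y)) (fun x => x) false with hg
  have hyear : ∀ y, ∀ x ∈ g y, pvYearOf x = y := by
    intro y x hx
    have : x ∈ l.filter (fun s => pvYearOf s == y) :=
      ((PySem.List.sorted_perm _ _ _).mem_iff).mp hx
    simpa using (List.mem_filter.mp this).2
  rw [List.pairwise_flatMap]
  constructor
  · intro y _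
    have hpw : List.Pairwise (fun a b : String => a ≤ b) (g y) := by
      simpa using PySem.List.sorted_pairwise (l.filter (fun s => pvYearOf s == y)) (fun x => x)
    refine List.Pairwise.imp_of_mem ?_ hpw
    intro a b ha hb hle
    rw [pvKeyL, pvKeyL, Prod.Lex.le_iff]
    right
    exact ⟨by simp only [ofLex_toLex]; rw [hyear y a ha, hyear y b hb], hle⟩
  · have hYle : List.Pairwise (fun a b : String => a ≤ b) Y := by
      simpa using PySem.List.sorted_pairwise (PySem.Set.ofList (l.map pvYearOf)) (fun x => x)
    have hYnd : Y.Nodup :=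
      ((PySem.List.sorted_perm _ _ _).nodup_iff).mpr (PySem.Set.nodup_ofList _)
    have hYlt : List.Pairwise (fun a b : String => a < b) Y := by
      refine List.Pairwise.imp ?_ (hYle.and hYnd)
      intro a b ⟨h1, h2⟩
      exact lt_of_le_of_ne h1 h2
    refine List.Pairwise.imp ?_ hYlt
    intro y1 y2 hlt x hx z hz
    rw [pvKeyL, pvKeyL, Prod.Lex.le_iff]
    left
    simp only [ofLex_toLex]
    rw [hyear y1 x hx, hyear y2 z hz]
    exact hlt

-- ===== VERDICT (by name: the statement is the Claim_ definition above) =====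
theorem sort_update_files_spec : Claim_equal_sort_update_files := by
  intro l _ _
  show sort_update_files l = sort_update_files_alt l
  rw [a_char, alt_eq_sorted_keyL]
  refine PySem.List.eq_of_perm_of_pairwise_le_of_injective pvKeyL pvKeyL_injective
    ((a_perm l).trans (PySem.List.sorted_perm l pvKeyL false).symm)
    (a_pairwise l) ?_
  exact PySem.List.sorted_pairwise l pvKeyL
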